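-- pv_equiv track=rewrite | github.com/colefuerth/Advent-of-Code-2020 | day14/AoC.py | parsemask
-- ===== SOURCE A (Python) =====
-- def parsemask(line):
--     l = len(line)
--     mask = [2 ** l - 1, 0]
--     for i, ch in enumerate(line):
--         if ch == '1':
--             mask[1] |= 1 << (l - i - 1)
--         elif ch == '0':
--             mask[0] ^= 1 << (l - i - 1)
--     return mask
-- ===== SOURCE B (Python) =====
-- def parsemask(line):
--     if not line:
--         return [0, 0]
--     and_str = ''.join('0' if c == '0' else '1' for c in line)
--     or_str = ''.join('1' if c == '1' else '0' for c in line)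
--     return [int(and_str, 2), int(or_str, 2)]
-- ===== Notes on version B (the rewrite author's own statement) =====
-- stated objective: simpler
-- what changed: Replaces the per-position shift/xor/or accumulation loop with building two binary strings ('0' clears the AND bit, '1' sets the OR bit) and parsing each once with int(s, 2).
import Mathlib
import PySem

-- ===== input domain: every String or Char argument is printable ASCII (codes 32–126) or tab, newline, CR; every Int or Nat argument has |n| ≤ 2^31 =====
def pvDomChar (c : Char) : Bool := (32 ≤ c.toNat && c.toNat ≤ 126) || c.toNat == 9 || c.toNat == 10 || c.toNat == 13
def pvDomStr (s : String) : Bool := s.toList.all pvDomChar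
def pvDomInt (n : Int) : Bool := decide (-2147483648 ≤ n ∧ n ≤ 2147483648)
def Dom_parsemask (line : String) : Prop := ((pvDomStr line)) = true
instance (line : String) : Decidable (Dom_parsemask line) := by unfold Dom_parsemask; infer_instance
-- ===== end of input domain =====

-- B replaces A's per-position shift/xor/or loop by building two binary digit strings and
-- parsing each once in base 2 (objective: simpler). Equivalence is proved for every input.

-- ===== PORT A =====
-- All intermediate ints in A are nonnegative, so Python's `|`, `^`, `<<` are exactly
-- Nat.lor / Nat.xor / Nat.shiftLeft here; the loop index satisfies i < l, so the Python
-- exponent l - i - 1 coincides with Nat truncated subtraction.  `enumerate(line)` is the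
-- fold over `line.toList.zipIdx`.
def parsemaskLoop (l : Nat) (ps : List (Char × Nat)) (mask : Nat × Nat) : Nat × Nat :=
  ps.foldl (fun mask p =>
    if p.1 = '1' then (mask.1, mask.2 ||| (1 <<< (l - p.2 - 1)))
    else if p.1 = '0' then (mask.1 ^^^ (1 <<< (l - p.2 - 1)), mask.2)
    else mask) mask

def parsemask (line : String) : List Int :=
  let l : Nat := line.toList.length
  let mask : Nat × Nat := (2 ^ l - 1, 0)
  let m := parsemaskLoop l (line.toList.zipIdx) mask
  [(m.1 : Int), (m.2 : Int)]

-- ===== PORT B =====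
-- `int(s, 2)` on a string of '0'/'1' digits (which and_str/or_str always are) is exactly
-- the base-2 accumulation fold below.
def intOfBin (ds : List Char) : Nat :=
  ds.foldl (fun a c => 2 * a + (if c = '1' then 1 else 0)) 0

def parsemask_alt (line : String) : List Int :=
  if line.toList = [] then [0, 0]
  else
    let andStr : List Char := line.toList.map (fun c => if c = '0' then '0' else '1')
    let orStr : List Char := line.toList.map (fun c => if c = '1' then '1' else '0')
    [(intOfBin andStr : Int), (intOfBin orStr : Int)]

-- ===== PRECONDITION & SPEC =====
def Spec_parsemask (line : String) (out : List Int) : Prop := out = parsemask_alt line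
instance (line : String) (out : List Int) : Decidable (Spec_parsemask line out) := by unfold Spec_parsemask; infer_instance

-- ===== CLAIM (what is proved, stated in full; the proofs are below) =====
def Claim_equal_parsemask : Prop := ∀ (line : String), Dom_parsemask line → Spec_parsemask line (parsemask line)

-- ===== LEMMAS AND PROOFS =====

-- clearing the top bit of an all-ones low block
theorem xor_clear_bit (a m : Nat) :
    (2 ^ (m + 1) * a + (2 ^ (m + 1) - 1)) ^^^ 2 ^ m = 2 ^ (m + 1) * a + (2 ^ m - 1) := by
  apply Nat.eq_of_testBit_eq
  intro j
  rw [Nat.testBit_xor,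
    Nat.testBit_two_pow_mul_add a (b := 2 ^ (m + 1) - 1) (Nat.sub_lt (Nat.two_pow_pos _) one_pos) j,
    Nat.testBit_two_pow_mul_add a (b := 2 ^ m - 1)
      (lt_of_le_of_lt (Nat.sub_le _ _) (Nat.pow_lt_pow_right (by norm_num) (Nat.lt_succ_self m))) j,
    Nat.testBit_two_pow, Nat.testBit_two_pow_sub_one, Nat.testBit_two_pow_sub_one]
  rcases lt_trichotomy j m with h | h | h
  · simp [Nat.lt_succ_of_lt h, h, Nat.ne_of_gt h]
  · simp [h]
  · simp [Nat.not_lt.mpr h, Nat.ne_of_lt h]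

-- setting a fresh bit below an even block
theorem or_set_bit (b m : Nat) :
    2 ^ (m + 1) * b ||| 2 ^ m = 2 ^ (m + 1) * b + 2 ^ m := by
  apply Nat.eq_of_testBit_eq
  intro j
  have h1 : (2 ^ (m + 1) * b + 0).testBit j = if j < m + 1 then Nat.testBit 0 j else b.testBit (j - (m + 1)) :=
    Nat.testBit_two_pow_mul_add b (Nat.two_pow_pos _) j
  have h2 : (2 ^ (m + 1) * b + 2 ^ m).testBit j = if j < m + 1 then (2 ^ m).testBit j else b.testBit (j - (m + 1)) :=
    Nat.testBit_two_pow_mul_add b (Nat.pow_lt_pow_right (by norm_num) (Nat.lt_succ_self m)) j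
  rw [Nat.testBit_lor, h2]
  rw [Nat.add_zero] at h1
  rw [h1, Nat.testBit_two_pow]
  by_cases h : j < m + 1
  · simp [h]
  · simp [h, Nat.ne_of_lt (by omega : m < j)]

-- arithmetic: an all-ones low block absorbs its top bit
theorem blockA (t a : Nat) (ht : 1 ≤ t) :
    t * 2 * a + (t * 2 - 1) = t * (2 * a + 1) + (t - 1) := by
  obtain ⟨s, rfl⟩ := Nat.exists_eq_add_of_le ht
  have h1 : (1 + s) * 2 - 1 = 1 + 2 * s := by omega
  have h2 : (1 + s) - 1 = s := by omega
  rw [h1, h2]; ring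

-- the loop invariant: starting from an all-ones low block (AND) and an all-zeros low block (OR),
-- A's loop over the remaining characters computes exactly B's base-2 accumulation folds.
theorem loop_inv (cs : List Char) : ∀ (i l a b : Nat), i + cs.length = l →
    parsemaskLoop l (cs.zipIdx i) (2 ^ cs.length * a + (2 ^ cs.length - 1), 2 ^ cs.length * b)
      = (cs.foldl (fun a c => 2 * a + (if c = '0' then 0 else 1)) a,
         cs.foldl (fun a c => 2 * a + (if c = '1' then 1 else 0)) b) := by
  induction cs with
  | nil => intro i l a b _; simp [parsemaskLoop]
  | cons c cs ih =>
    intro i l a b hl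
    have hli : l - i - 1 = cs.length := by simp [List.length_cons] at hl; omega
    have hsh : (1 : Nat) <<< (l - i - 1) = 2 ^ cs.length := by
      rw [hli, Nat.shiftLeft_eq, Nat.one_mul]
    have hstep : ∀ ms, parsemaskLoop l ((c, i) :: cs.zipIdx (i + 1)) ms
        = parsemaskLoop l (cs.zipIdx (i + 1))
          (if c = '1' then (ms.1, ms.2 ||| (1 <<< (l - i - 1)))
           else if c = '0' then (ms.1 ^^^ (1 <<< (l - i - 1)), ms.2) else ms) := by
      intro ms; simp [parsemaskLoop]
    have hpow : (2 : Nat) ^ (c :: cs).length = 2 ^ cs.length * 2 := by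
      rw [List.length_cons, pow_succ]
    have hp : (2 : Nat) ^ cs.length * 2 = 2 ^ (cs.length + 1) := (pow_succ 2 cs.length).symm
    have hnext : i + 1 + cs.length = l := by simp [List.length_cons] at hl; omega
    have e1 : 2 ^ (c :: cs).length * a + (2 ^ (c :: cs).length - 1)
        = 2 ^ cs.length * (2 * a + 1) + (2 ^ cs.length - 1) := by
      rw [hpow]; exact blockA (2 ^ cs.length) a Nat.one_le_two_pow
    have e0 : 2 ^ (c :: cs).length * b = 2 ^ cs.length * (2 * b) := by rw [hpow]; ring
    rw [List.zipIdx_cons, hstep]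
    by_cases h1 : c = '1'
    · have e2 : 2 ^ (c :: cs).length * b ||| (1 <<< (l - i - 1)) = 2 ^ cs.length * (2 * b + 1) := by
        rw [hsh, hpow, hp, or_set_bit b cs.length, pow_succ]; ring
      rw [if_pos h1]
      rw [show ((2 ^ (c :: cs).length * a + (2 ^ (c :: cs).length - 1),
            2 ^ (c :: cs).length * b) : Nat × Nat).1 = 2 ^ (c :: cs).length * a + (2 ^ (c :: cs).length - 1) from rfl,
          show ((2 ^ (c :: cs).length * a + (2 ^ (c :: cs).length - 1),
            2 ^ (c :: cs).length * b) : Nat × Nat).2 = 2 ^ (c :: cs).length * b from rfl]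
      rw [e2, e1, ih (i + 1) l (2 * a + 1) (2 * b + 1) hnext]
      simp [h1]
    · by_cases h0 : c = '0'
      · have e3 : (2 ^ (c :: cs).length * a + (2 ^ (c :: cs).length - 1)) ^^^ (1 <<< (l - i - 1))
            = 2 ^ cs.length * (2 * a) + (2 ^ cs.length - 1) := by
          rw [hsh, hpow, hp, xor_clear_bit a cs.length]
          have : (2 : Nat) ^ (cs.length + 1) * a = 2 ^ cs.length * (2 * a) := by
            rw [pow_succ]; ring
          rw [this]
        rw [if_neg h1, if_pos h0]
        rw [show ((2 ^ (c :: cs).length * a + (2 ^ (c :: cs).length - 1),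
              2 ^ (c :: cs).length * b) : Nat × Nat).1 = 2 ^ (c :: cs).length * a + (2 ^ (c :: cs).length - 1) from rfl,
            show ((2 ^ (c :: cs).length * a + (2 ^ (c :: cs).length - 1),
              2 ^ (c :: cs).length * b) : Nat × Nat).2 = 2 ^ (c :: cs).length * b from rfl]
        rw [e3, e0, ih (i + 1) l (2 * a) (2 * b) hnext]
        simp [h0, h1]
      · rw [if_neg h1, if_neg h0]
        rw [show ((2 ^ (c :: cs).length * a + (2 ^ (c :: cs).length - 1),
              2 ^ (c :: cs).length * b) : Nat × Nat)
            = (2 ^ cs.length * (2 * a + 1) + (2 ^ cs.length - 1), 2 ^ cs.length * (2 * b)) from by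
          rw [e1, e0]]
        rw [ih (i + 1) l (2 * a + 1) (2 * b) hnext]
        simp [h0, h1]

-- B's mapped folds coincide with A's character folds
theorem fold_and_map (cs : List Char) : ∀ a : Nat,
    List.foldl (fun x y => 2 * x + if y = '1' then 1 else 0) a
        (cs.map (fun c => if c = '0' then '0' else '1'))
      = List.foldl (fun x y => 2 * x + if y = '0' then 0 else 1) a cs := by
  induction cs with
  | nil => intro a; rfl
  | cons c cs ih =>
    intro a
    simp only [List.map_cons, List.foldl_cons, ih]
    by_cases hc : c = '0' <;> simp [hc]

theorem fold_or_map (cs : List Char) : ∀ a : Nat,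
    List.foldl (fun x y => 2 * x + if y = '1' then 1 else 0) a
        (cs.map (fun c => if c = '1' then '1' else '0'))
      = List.foldl (fun x y => 2 * x + if y = '1' then 1 else 0) a cs := by
  induction cs with
  | nil => intro a; rfl
  | cons c cs ih =>
    intro a
    simp only [List.map_cons, List.foldl_cons, ih]
    by_cases hc : c = '1' <;> simp [hc]

-- ===== VERDICT (by name: the statement is the Claim_ definition above) =====
theorem parsemask_spec : Claim_equal_parsemask := by
  intro line _
  unfold Spec_parsemask parsemask parsemask_alt
  cases hcs : line.toList with
  | nil => simp [parsemaskLoop, intOfBin]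
  | cons c cs =>
    simp only [if_neg (by simp : (c :: cs : List Char) ≠ [])]
    have h := loop_inv (c :: cs) 0 (c :: cs).length 0 0 (by omega)
    simp only [Nat.mul_zero, Nat.zero_add] at h
    rw [h]
    simp only [intOfBin, fold_and_map, fold_or_map]
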